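-- pv_equiv track=rewrite | github.com/nbh42011-maker/marco-generator-bot | bot.py | parse_items_from_text
-- ===== SOURCE A (Python) =====
-- from typing import Optional, List, Dict, Set
--
-- def parse_items_from_text(text: str) -> List[str]:
--     """
--     Normalize provided text into a list of items.
--     Accepts newline-separated and comma-separated text. Strips and removes empties.
--     Preserves order, removes duplicates while preserving first occurrence.
--     """
--     if not text:
--         return []
--     # unify line endings
--     text = text.replace("\r\n", "\n").replace("\r", "\n")
--     lines: List[str] = []
--     for raw_line in text.split("\n"):
--         if not raw_line:
--             continue
--         # if comma-separated in a single line, split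
--         if "," in raw_line and len(raw_line.strip()) > 0 and "\n" not in raw_line:
--             for part in raw_line.split(","):
--                 s = part.strip()
--                 if s:
--                     lines.append(s)
--         else:
--             s = raw_line.strip()
--             if s:
--                 lines.append(s)
--     # dedupe preserving order
--     seen = set()
--     out = []
--     for l in lines:
--         if l not in seen:
--             seen.add(l)
--             out.append(l)
--     return out
-- ===== SOURCE B (Python) =====
-- def parse_items_from_text(text):
--     """One char-level pass: ',', '\n' and '\r' all act as separators; strip,
--     drop empties and dedupe (first occurrence) inline while scanning."""
--     out = []
--     seen = set()
--     buf = []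
--     for ch in text + "\n":
--         if ch in ",\n\r":
--             tok = "".join(buf).strip()
--             buf = []
--             if tok and tok not in seen:
--                 seen.add(tok)
--                 out.append(tok)
--         else:
--             buf.append(ch)
--     return out
-- ===== Notes on version B (the rewrite author's own statement) =====
-- stated objective: alternative
-- what changed: Replaced A's normalize-line-endings / split-on-newlines / conditionally-split-on-commas / dedupe-afterwards pipeline with a single character-level scan that treats comma, newline and carriage return all as token separators and strips, filters and dedupes each token inline as it is flushed.
import Mathlib
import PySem

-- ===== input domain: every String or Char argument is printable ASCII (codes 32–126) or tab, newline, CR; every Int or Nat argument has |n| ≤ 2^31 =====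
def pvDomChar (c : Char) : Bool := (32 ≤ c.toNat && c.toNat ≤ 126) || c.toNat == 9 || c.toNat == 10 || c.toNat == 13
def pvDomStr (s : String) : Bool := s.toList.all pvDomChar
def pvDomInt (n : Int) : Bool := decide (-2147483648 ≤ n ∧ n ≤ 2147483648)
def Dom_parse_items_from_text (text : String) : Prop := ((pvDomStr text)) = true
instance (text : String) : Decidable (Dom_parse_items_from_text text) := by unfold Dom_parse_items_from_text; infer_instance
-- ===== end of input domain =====

-- B replaces A's normalize/split-lines/split-commas/then-dedupe pipeline with a single
-- char-level scan treating ',', '\n', '\r' all as separators, deduping inline (alternative decomposition).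

-- ===== PORT A =====
-- str.split("\n") / split(",") ported via PySem.Str.split?; the separators are literal
-- nonempty strings, so split? is always `some` and `.getD []` is exact.
def parse_items_from_text (text : String) : List String :=
  if text = "" then []
  else
    let text := PySem.Str.replace (PySem.Str.replace text "\r\n" "\n") "\r" "\n"
    let lines : List String :=
      ((PySem.Str.split? text "\n").getD []).foldl (fun lines raw_line =>
        if raw_line = "" then lines
        else if PySem.Str.isIn "," raw_line
               && decide (0 < PySem.Str.len (PySem.Str.strip raw_line))
               && !(PySem.Str.isIn "\n" raw_line) then
          ((PySem.Str.split? raw_line ",").getD []).foldl (fun lines part =>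
            let s := PySem.Str.strip part
            if s ≠ "" then lines ++ [s] else lines) lines
        else
          let s := PySem.Str.strip raw_line
          if s ≠ "" then lines ++ [s] else lines) []
    (lines.foldl (fun (p : List String × PySem.Set String) l =>
        if !(p.2.contains l) then (p.1 ++ [l], p.2.add l) else p)
      ([], PySem.Set.empty)).1

-- ===== PORT B =====
-- the loop body of Source B: flush the buffer at a separator, otherwise extend it
def pvAltStep (st : List String × PySem.Set String × List Char) (ch : Char) :
    List String × PySem.Set String × List Char :=
  if PySem.Chars.isIn [ch] ",\n\r".toList then
    let tok := String.ofList (PySem.Chars.strip st.2.2)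
    if tok ≠ "" && !(st.2.1.contains tok) then (st.1 ++ [tok], st.2.1.add tok, [])
    else (st.1, st.2.1, [])
  else (st.1, st.2.1, st.2.2 ++ [ch])

def parse_items_from_text_alt (text : String) : List String :=
  ((text.toList ++ "\n".toList).foldl pvAltStep ([], PySem.Set.empty, [])).1

-- ===== PRECONDITION & SPEC =====
def Spec_parse_items_from_text (text : String) (out : List String) : Prop := out = parse_items_from_text_alt text
instance (text : String) (out : List String) : Decidable (Spec_parse_items_from_text text out) := by unfold Spec_parse_items_from_text; infer_instance

-- ===== CLAIM (what is proved, stated in full; the proofs are below) =====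
def Claim_equal_parse_items_from_text : Prop := ∀ (text : String), Dom_parse_items_from_text text → Spec_parse_items_from_text text (parse_items_from_text text)

-- ===== LEMMAS AND PROOFS =====

-- structural splitter on a separator predicate (specification-side model of str.split)
def pvSsp (p : Char → Bool) : List Char → List (List Char)
  | [] => [[]]
  | c :: t => if p c then [] :: pvSsp p t else (pvSsp p t).modifyHead (c :: ·)

def pvS2 (c : Char) : Bool := c == ',' || c == '\n'
def pvS3 (c : Char) : Bool := (c == ',' || c == '\n') || c == '\r'

-- model of text.replace("\r\n", "\n")
def pvR2 : List Char → List Char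
  | [] => []
  | '\r' :: '\n' :: t => '\n' :: pvR2 t
  | c :: t => c :: pvR2 t

-- model of one char under text.replace("\r", "\n")
def pvF1 (c : Char) : Char := if c == '\r' then '\n' else c

-- strip every token, drop the empty ones
def pvF (l : List (List Char)) : List (List Char) :=
  (l.map PySem.Chars.strip).filter (· ≠ [])

-- A's dedupe loop as a fold
def pvDD (st : List String × PySem.Set String) (toks : List String) :
    List String × PySem.Set String :=
  toks.foldl (fun p l => if !(p.2.contains l) then (p.1 ++ [l], p.2.add l) else p) st

theorem pvSsp_ne_nil (p : Char → Bool) (cs : List Char) : pvSsp p cs ≠ [] := by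
  induction cs with
  | nil => simp [pvSsp]
  | cons c t ih =>
    simp only [pvSsp]
    split
    · simp
    · cases h : pvSsp p t with
      | nil => exact absurd h ih
      | cons x xs => simp [List.modifyHead]

theorem pvIsIn_singleton (a : Char) (l : List Char) :
    PySem.Chars.isIn [a] l = l.contains a := by
  cases hc : l.contains a
  · rw [PySem.Chars.isIn_eq_false_iff, List.singleton_infix_iff]
    simpa using hc
  · rw [(PySem.Chars.isIn_iff_infix _ _).mpr]
    rw [List.singleton_infix_iff]
    simpa using hc

theorem pvSplitGo (a : Char) : ∀ (fuel : Nat) (l cur : List Char) (acc : List (List Char)),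
    l.length < fuel →
    PySem.Chars.splitOn.go [a] fuel l cur acc =
      acc.reverse ++ (pvSsp (· == a) l).modifyHead (cur.reverse ++ ·) := by
  intro fuel
  induction fuel with
  | zero => intro l cur acc h; omega
  | succ n ih =>
    intro l cur acc h
    cases l with
    | nil => simp [PySem.Chars.splitOn.go, pvSsp]
    | cons c t =>
      rw [PySem.Chars.splitOn.go]
      simp only [List.isPrefixOf, Bool.and_true]
      by_cases hac : a = c
      · subst hac
        simp only [BEq.rfl, if_true, List.length_cons, List.length_nil, List.drop_succ_cons,
          List.drop_zero]
        rw [ih t [] (cur.reverse :: acc) (by simp at h; omega)]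
        simp only [pvSsp, BEq.rfl, if_true]
        simp only [List.modifyHead, List.cons_append, List.nil_append, List.reverse_cons,
          List.append_assoc]
        cases pvSsp (fun x => x == a) t <;> simp
      · have hb : (a == c) = false := by simpa using hac
        have hb' : ((c : Char) == a) = false := by
          simp only [beq_eq_false_iff_ne]; exact fun hh => hac hh.symm
        simp only [hb, Bool.false_eq_true, if_false]
        rw [ih t (c :: cur) acc (by simp at h ⊢; omega)]
        simp only [pvSsp, hb', Bool.false_eq_true, if_false]
        cases hsp : pvSsp (· == a) t with
        | nil => exact absurd hsp (pvSsp_ne_nil _ _)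
        | cons x xs => simp [List.modifyHead]

theorem pvSplitOn_singleton (a : Char) (cs : List Char) :
    PySem.Chars.splitOn cs [a] = pvSsp (· == a) cs := by
  rw [PySem.Chars.splitOn, pvSplitGo a (cs.length + 1) cs [] [] (by omega)]
  cases h : pvSsp (· == a) cs with
  | nil => exact absurd h (pvSsp_ne_nil _ _)
  | cons x xs => simp [List.modifyHead]

theorem pvR2_cons (c : Char) (t : List Char) (h : ¬ (c = '\r' ∧ ∃ t', t = '\n' :: t')) :
    pvR2 (c :: t) = c :: pvR2 t := by
  rw [pvR2.eq_def]
  split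
  · simp_all
  · rename_i t' heq
    injection heq with h1 h2
    exact absurd ⟨h1, t', h2⟩ h
  · rename_i heq
    injection heq with h1 h2
    rw [h1, h2]

theorem pvReplaceGo2 : ∀ (fuel : Nat) (l : List Char) (acc : List Char),
    l.length ≤ fuel →
    PySem.Chars.replace.go ['\r', '\n'] ['\n'] fuel l acc = acc.reverse ++ pvR2 l := by
  intro fuel
  induction fuel with
  | zero =>
    intro l acc h
    have hl : l = [] := by rw [← List.length_eq_zero_iff]; omega
    subst hl
    simp [PySem.Chars.replace.go, pvR2]
  | succ n ih =>
    intro l acc h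
    cases l with
    | nil => simp [PySem.Chars.replace.go, pvR2]
    | cons c t =>
      rw [PySem.Chars.replace.go]
      by_cases hp : List.isPrefixOf ['\r', '\n'] (c :: t)
      · rw [if_pos hp]
        rw [List.isPrefixOf_iff_prefix] at hp
        obtain ⟨t', ht⟩ := hp
        simp only [List.cons_append, List.nil_append] at ht
        injection ht with h1 h2
        subst h1; subst h2
        rw [ih _ _ (by simp at h ⊢; omega)]
        simp [pvR2]
      · rw [if_neg hp]
        rw [ih t (c :: acc) (by simp at h ⊢; omega)]
        rw [pvR2_cons c t (by
          rintro ⟨rfl, t', rfl⟩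
          exact hp (by rw [List.isPrefixOf_iff_prefix]; exact ⟨t', rfl⟩))]
        simp

theorem pvReplace_crlf (cs : List Char) :
    PySem.Chars.replace cs ['\r', '\n'] ['\n'] = pvR2 cs := by
  rw [PySem.Chars.replace.eq_def]
  simp only [List.isEmpty_cons, Bool.false_eq_true, if_false]
  rw [pvReplaceGo2 cs.length cs [] (le_refl _)]
  simp

theorem pvReplaceGo1 : ∀ (fuel : Nat) (l : List Char) (acc : List Char),
    l.length ≤ fuel →
    PySem.Chars.replace.go ['\r'] ['\n'] fuel l acc = acc.reverse ++ l.map pvF1 := by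
  intro fuel
  induction fuel with
  | zero =>
    intro l acc h
    have hl : l = [] := by rw [← List.length_eq_zero_iff]; omega
    subst hl
    simp [PySem.Chars.replace.go]
  | succ n ih =>
    intro l acc h
    cases l with
    | nil => simp [PySem.Chars.replace.go]
    | cons c t =>
      rw [PySem.Chars.replace.go]
      by_cases hc : c = '\r'
      · subst hc
        rw [if_pos (by simp [List.isPrefixOf])]
        rw [ih _ _ (by simp at h ⊢; omega)]
        simp [pvF1]
      · rw [if_neg (by simp [List.isPrefixOf]; exact fun hh => hc hh.symm)]
        rw [ih t (c :: acc) (by simp at h ⊢; omega)]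
        simp [pvF1, hc]

theorem pvReplace_cr (cs : List Char) :
    PySem.Chars.replace cs ['\r'] ['\n'] = cs.map pvF1 := by
  rw [PySem.Chars.replace.eq_def]
  simp only [List.isEmpty_cons, Bool.false_eq_true, if_false]
  rw [pvReplaceGo1 cs.length cs [] (le_refl _)]
  simp

theorem pvMem_ssp (p : Char → Bool) (cs : List Char) (L : List Char)
    (hL : L ∈ pvSsp p cs) : ∀ c ∈ L, p c = false := by
  induction cs generalizing L with
  | nil => simp [pvSsp] at hL; simp [hL]
  | cons c t ih =>
    simp only [pvSsp] at hL
    split at hL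
    · rw [List.mem_cons] at hL
      rcases hL with rfl | hL
      · simp
      · exact ih L hL
    · rename_i hpc
      cases hsp : pvSsp p t with
      | nil => exact absurd hsp (pvSsp_ne_nil _ _)
      | cons x xs =>
        rw [hsp, List.modifyHead, List.mem_cons] at hL
        rcases hL with rfl | hL
        · intro d hd
          rw [List.mem_cons] at hd
          rcases hd with rfl | hd
          · simpa using hpc
          · exact ih x (by rw [hsp]; exact List.mem_cons_self) d hd
        · exact ih L (by rw [hsp]; exact List.mem_cons_of_mem _ hL)

theorem pvSsp_no_sep (p : Char → Bool) (L : List Char) (h : ∀ c ∈ L, p c = false) :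
    pvSsp p L = [L] := by
  induction L with
  | nil => rfl
  | cons c t ih =>
    simp only [pvSsp]
    rw [if_neg (by simp [h c List.mem_cons_self])]
    rw [ih (fun d hd => h d (List.mem_cons_of_mem _ hd))]
    rfl

theorem pvMem_dropWhile (p : Char → Bool) (c : Char) (l : List Char) (h : c ∈ l)
    (hc : p c = false) : c ∈ l.dropWhile p := by
  induction l with
  | nil => simp at h
  | cons x t ih =>
    rw [List.dropWhile]
    rw [List.mem_cons] at h
    rcases h with rfl | h
    · simp only [hc]; exact List.mem_cons_self
    · cases hx : p x
      · exact List.mem_cons_of_mem _ h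
      · exact ih h

theorem pvMem_strip (c : Char) (cs : List Char) (h : c ∈ cs)
    (hc : PySem.Chars.isspace c = false) : c ∈ PySem.Chars.strip cs := by
  rw [PySem.Chars.strip, PySem.Chars.rstrip, PySem.Chars.lstrip]
  rw [List.mem_reverse]
  apply pvMem_dropWhile _ _ _ _ hc
  rw [List.mem_reverse]
  exact pvMem_dropWhile _ _ _ h hc

theorem pvSsp_flatMap (p q : Char → Bool) (ds : List Char) :
    (pvSsp p ds).flatMap (pvSsp q) = pvSsp (fun c => q c || p c) ds := by
  induction ds with
  | nil => simp [pvSsp]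
  | cons c t ih =>
    simp only [pvSsp]
    by_cases hp : p c = true
    · rw [if_pos hp, if_pos (by simp [hp])]
      simp only [List.flatMap_cons, pvSsp]
      rw [ih]
      rfl
    · rw [if_neg hp]
      cases hsp : pvSsp p t with
      | nil => exact absurd hsp (pvSsp_ne_nil _ _)
      | cons x xs =>
        simp only [List.modifyHead, List.flatMap_cons]
        by_cases hq : q c = true
        · rw [if_pos (by simp [hq])]
          simp only [pvSsp, if_pos hq]
          rw [← ih, hsp]
          simp [List.flatMap_cons]
        · rw [if_neg (by simp [hq, hp])]
          simp only [pvSsp, if_neg hq]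
          rw [← ih, hsp]
          simp only [List.flatMap_cons]
          cases hsq : pvSsp q x with
          | nil => exact absurd hsq (pvSsp_ne_nil _ _)
          | cons y ys => simp [List.modifyHead]

theorem pvF_append (a b : List (List Char)) : pvF (a ++ b) = pvF a ++ pvF b := by
  simp [pvF]

theorem pvF_cons (x : List Char) (l : List (List Char)) :
    pvF (x :: l) = (if PySem.Chars.strip x ≠ [] then [PySem.Chars.strip x] else []) ++ pvF l := by
  simp only [pvF, List.map_cons, List.filter_cons]
  split <;> simp_all

theorem pvModifyHead_nil_append (l : List (List Char)) :
    l.modifyHead (fun x => [] ++ x) = l := by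
  cases l <;> simp [List.modifyHead]

theorem pvSsp_modifyHead_append (p : Char → Bool) (cs : List Char) (buf : List Char) (c : Char) :
    ((pvSsp p cs).modifyHead (c :: ·)).modifyHead (buf ++ ·) =
      (pvSsp p cs).modifyHead ((buf ++ [c]) ++ ·) := by
  rw [List.modifyHead_modifyHead]
  cases h : pvSsp p cs with
  | nil => exact absurd h (pvSsp_ne_nil _ _)
  | cons x xs => simp [List.modifyHead]

-- the core equivalence of the two tokenizations
theorem pvCore (cs : List Char) :
    ∀ buf : List Char,
      pvF ((pvSsp pvS2 ((pvR2 cs).map pvF1)).modifyHead (buf ++ ·)) =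
      pvF ((pvSsp pvS3 cs).modifyHead (buf ++ ·)) := by
  induction cs using pvR2.induct with
  | case1 => intro buf; simp [pvR2, pvSsp, List.modifyHead]
  | case2 t ih =>
    intro buf
    have ihnil : pvF (pvSsp pvS2 (List.map pvF1 (pvR2 t))) = pvF (pvSsp pvS3 t) := by
      have := ih []
      rwa [pvModifyHead_nil_append, pvModifyHead_nil_append] at this
    have h2 : pvR2 ('\r' :: '\n' :: t) = '\n' :: pvR2 t := rfl
    rw [h2]
    simp only [List.map_cons, show pvF1 '\n' = '\n' from rfl]
    simp only [pvSsp, show pvS2 '\n' = true from rfl, show pvS3 '\r' = true from rfl,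
      show pvS3 '\n' = true from rfl, if_true]
    simp only [List.modifyHead, pvF_cons]
    rw [show PySem.Chars.strip ([] : List Char) = [] from rfl]
    simp only [ne_eq, not_true_eq_false, if_false, List.nil_append]
    rw [ihnil]
  | case3 c t h1 ih =>
    intro buf
    have ihnil : pvF (pvSsp pvS2 (List.map pvF1 (pvR2 t))) = pvF (pvSsp pvS3 t) := by
      have := ih []
      rwa [pvModifyHead_nil_append, pvModifyHead_nil_append] at this
    have hr2 : pvR2 (c :: t) = c :: pvR2 t := by
      apply pvR2_cons
      rintro ⟨rfl, t', rfl⟩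
      exact h1 t' rfl rfl
    rw [hr2]
    simp only [List.map_cons]
    by_cases hs3 : pvS3 c = true
    · have hs2 : pvS2 (pvF1 c) = true := by
        simp only [pvS3, pvS2, pvF1, Bool.or_eq_true, beq_iff_eq] at hs3 ⊢
        rcases hs3 with (rfl | rfl) | rfl <;> simp
      simp only [pvSsp, hs2, hs3, if_true, List.modifyHead, pvF_cons]
      rw [ihnil]
    · have hs3' := hs3
      simp only [pvS3, Bool.or_eq_true, not_or, Bool.not_eq_true] at hs3'
      obtain ⟨⟨hc1, hc2⟩, hc3⟩ := hs3'
      have hf1 : pvF1 c = c := by simp [pvF1, hc3]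
      have hs2 : pvS2 c = false := by simp [pvS2, hc1, hc2]
      rw [hf1]
      simp only [pvSsp, hs2, Bool.false_eq_true, if_false]
      rw [if_neg (by simp [hs3])]
      rw [pvSsp_modifyHead_append, pvSsp_modifyHead_append]
      exact ih (buf ++ [c])

theorem pvOfList_eq_empty (L : List Char) : (String.ofList L = "") ↔ L = [] := by
  constructor
  · intro h
    have := congrArg String.toList h
    simpa using this
  · rintro rfl; rfl

theorem pvStr_strip_ofList (P : List Char) :
    PySem.Str.strip (String.ofList P) = String.ofList (PySem.Chars.strip P) := by
  rw [PySem.Str.strip, String.toList_ofList]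

theorem pvA_inner (parts : List (List Char)) (acc : List String) :
    (parts.map String.ofList).foldl (fun lines part =>
        let s := PySem.Str.strip part
        if s ≠ "" then lines ++ [s] else lines) acc =
      acc ++ (pvF parts).map String.ofList := by
  induction parts generalizing acc with
  | nil => simp [pvF]
  | cons P rest ih =>
    simp only [List.map_cons, List.foldl_cons]
    rw [pvStr_strip_ofList]
    by_cases hp : PySem.Chars.strip P = []
    · rw [if_neg (by simp [hp, pvOfList_eq_empty])]
      rw [ih]
      simp [pvF, hp]
    · rw [if_pos (by simp [pvOfList_eq_empty, hp])]
      rw [ih]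
      simp [pvF, hp]

theorem pvStr_isIn_ofList (a : Char) (sep : String) (hsep : sep.toList = [a]) (L : List Char) :
    PySem.Str.isIn sep (String.ofList L) = L.contains a := by
  rw [PySem.Str.isIn, hsep, String.toList_ofList, pvIsIn_singleton]

theorem pvStr_split?_ofList (a : Char) (sep : String) (hsep : sep.toList = [a]) (L : List Char) :
    PySem.Str.split? (String.ofList L) sep =
      some ((pvSsp (· == a) L).map String.ofList) := by
  rw [PySem.Str.split?, String.toList_ofList, hsep, PySem.Chars.split?]
  simp [pvSplitOn_singleton]

theorem pvA_outer (LL : List (List Char)) (hLL : ∀ L ∈ LL, ∀ c ∈ L, (c == '\n') = false)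
    (acc : List String) :
    (LL.map String.ofList).foldl (fun lines raw_line =>
        if raw_line = "" then lines
        else if PySem.Str.isIn "," raw_line
               && decide (0 < PySem.Str.len (PySem.Str.strip raw_line))
               && !(PySem.Str.isIn "\n" raw_line) then
          ((PySem.Str.split? raw_line ",").getD []).foldl (fun lines part =>
            let s := PySem.Str.strip part
            if s ≠ "" then lines ++ [s] else lines) lines
        else
          let s := PySem.Str.strip raw_line
          if s ≠ "" then lines ++ [s] else lines) acc =
      acc ++ (LL.flatMap (fun L => pvF (pvSsp (· == ',') L))).map String.ofList := by
  induction LL generalizing acc with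
  | nil => simp
  | cons L rest ihr =>
    have hmem := hLL L List.mem_cons_self
    have ih := ihr (fun L' hL' => hLL L' (List.mem_cons_of_mem _ hL'))
    simp only [List.map_cons, List.foldl_cons, List.flatMap_cons]
    by_cases hnil : L = []
    · subst hnil
      rw [if_pos rfl, ih]
      simp [pvF, pvSsp, show PySem.Chars.strip ([] : List Char) = [] from rfl]
    · rw [if_neg (by simp [pvOfList_eq_empty, hnil])]
      rw [pvStr_isIn_ofList ',' "," (by decide) L]
      rw [pvStr_isIn_ofList '\n' "\n" (by decide) L]
      have hnoNl : L.contains '\n' = false := by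
        cases h : L.contains '\n'
        · rfl
        · exfalso
          have hm : '\n' ∈ L := by simpa using h
          simpa using hmem '\n' hm
      rw [hnoNl]
      by_cases hcomma : L.contains ',' = true
      · have hstrip : (0 : Int) < PySem.Str.len (PySem.Str.strip (String.ofList L)) := by
          rw [pvStr_strip_ofList, PySem.Str.len_eq, String.toList_ofList]
          have : ',' ∈ PySem.Chars.strip L := by
            apply pvMem_strip
            · simpa using hcomma
            · decide
          have := List.length_pos_of_mem this
          exact_mod_cast this
        rw [hcomma]
        simp only [decide_eq_true hstrip, Bool.true_and, Bool.and_true, Bool.not_false, if_true]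
        rw [pvStr_split?_ofList ',' "," (by decide) L]
        simp only [Option.getD_some]
        rw [pvA_inner, ih]
        simp [List.append_assoc]
      · have hc' : L.contains ',' = false := by simpa using hcomma
        rw [hc']
        simp only [Bool.false_and, Bool.false_eq_true, if_false]
        have hnosep : pvSsp (· == ',') L = [L] := by
          apply pvSsp_no_sep
          intro c hc
          cases h : (c == ',')
          · rfl
          · exfalso
            have : c = ',' := by simpa using h
            subst this
            have : L.contains ',' = true := by simpa using hc
            rw [this] at hc'
            exact absurd hc' (by simp)
        rw [hnosep]
        rw [pvStr_strip_ofList]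
        by_cases hp : PySem.Chars.strip L = []
        · rw [if_neg (by simp [hp])]
          rw [ih]
          simp [pvF, hp]
        · rw [if_pos (by simp [pvOfList_eq_empty, hp])]
          rw [ih]
          simp [pvF, hp, List.append_assoc]

theorem pvIsInSeps (c : Char) : PySem.Chars.isIn [c] ",\n\r".toList = pvS3 c := by
  have h : (",\n\r".toList) = [',', '\n', '\r'] := by decide
  rw [h, pvIsIn_singleton]
  cases h1 : (c == ',') <;> cases h2 : (c == '\n') <;> cases h3 : (c == '\r') <;>
    simp_all [pvS3, List.contains_cons]

theorem pvDD_append (st : List String × PySem.Set String) (a b : List String) :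
    pvDD st (a ++ b) = pvDD (pvDD st a) b := by
  simp [pvDD, List.foldl_append]

-- one flush of B's buffer acts like A's dedupe step on the buffer's token (if any)
theorem pvFlush (buf : List Char) (out : List String) (seen : PySem.Set String) :
    ((if (String.ofList (PySem.Chars.strip buf) ≠ "" &&
          !seen.contains (String.ofList (PySem.Chars.strip buf))) = true then
        (out ++ [String.ofList (PySem.Chars.strip buf)],
          seen.add (String.ofList (PySem.Chars.strip buf)))
      else (out, seen)) : List String × PySem.Set String) =
    pvDD (out, seen) ((pvF [buf]).map String.ofList) := by
  by_cases hp : PySem.Chars.strip buf = []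
  · rw [if_neg (by simp [pvOfList_eq_empty, hp])]
    simp [pvF, hp, pvDD]
  · have h1 : (String.ofList (PySem.Chars.strip buf) ≠ "") := by simp [pvOfList_eq_empty, hp]
    have h2 : pvF [buf] = [PySem.Chars.strip buf] := by simp [pvF, hp]
    rw [h2]
    simp only [List.map_cons, List.map_nil, pvDD, List.foldl_cons, List.foldl_nil]
    by_cases hc : seen.contains (String.ofList (PySem.Chars.strip buf)) = true
    · have hm := (PySem.Set.contains_iff _ _).mp hc
      simp [hc, hm]
    · have hm : String.ofList (PySem.Chars.strip buf) ∉ seen :=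
        fun h => hc ((PySem.Set.contains_iff _ _).mpr h)
      simp [hc, h1, hm, hp]

-- a separator step of B's loop is a flush
theorem pvStepSep (c : Char) (hs3 : pvS3 c = true) (buf : List Char) (out : List String)
    (seen : PySem.Set String) :
    pvAltStep (out, seen, buf) c =
      ((pvDD (out, seen) ((pvF [buf]).map String.ofList)).1,
       (pvDD (out, seen) ((pvF [buf]).map String.ofList)).2, []) := by
  rw [pvAltStep, if_pos (by rw [pvIsInSeps]; exact hs3)]
  rw [← pvFlush buf out seen]
  by_cases hcond : (String.ofList (PySem.Chars.strip buf) ≠ "" &&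
      !seen.contains (String.ofList (PySem.Chars.strip buf))) = true
  · simp only [hcond, if_true]
  · simp only [hcond, Bool.false_eq_true, if_false]

-- B's scan with inline dedupe equals dedupe over the three-separator tokens
theorem pvB_scan (cs : List Char) :
    ∀ (buf : List Char) (out : List String) (seen : PySem.Set String),
      (((cs ++ ['\n']).foldl pvAltStep (out, seen, buf)).1,
       ((cs ++ ['\n']).foldl pvAltStep (out, seen, buf)).2.1) =
      pvDD (out, seen) ((pvF ((pvSsp pvS3 cs).modifyHead (buf ++ ·))).map String.ofList) := by
  induction cs with
  | nil =>
    intro buf out seen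
    simp only [List.nil_append, List.foldl_cons, List.foldl_nil]
    rw [pvStepSep '\n' (by decide) buf out seen]
    have hm : (pvSsp pvS3 []).modifyHead (fun x => buf ++ x) = [buf] := by
      simp [pvSsp, List.modifyHead]
    rw [hm]
  | cons c t ih =>
    intro buf out seen
    simp only [List.cons_append, List.foldl_cons]
    by_cases hs3 : pvS3 c = true
    · rw [pvStepSep c hs3 buf out seen]
      have hmh : (pvSsp pvS3 (c :: t)).modifyHead (fun x => buf ++ x) = buf :: pvSsp pvS3 t := by
        simp only [pvSsp, hs3, if_true, List.modifyHead, List.append_nil]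
      rw [hmh, show buf :: pvSsp pvS3 t = [buf] ++ pvSsp pvS3 t from rfl, pvF_append,
        List.map_append, pvDD_append]
      have hih := ih [] (pvDD (out, seen) ((pvF [buf]).map String.ofList)).1
        (pvDD (out, seen) ((pvF [buf]).map String.ofList)).2
      rw [pvModifyHead_nil_append] at hih
      exact hih
    · rw [pvAltStep, if_neg (by rw [pvIsInSeps]; simp [hs3])]
      have hmh : (pvSsp pvS3 (c :: t)).modifyHead (fun x => buf ++ x) =
          (pvSsp pvS3 t).modifyHead (fun x => (buf ++ [c]) ++ x) := by
        simp only [pvSsp, hs3, Bool.false_eq_true, if_false]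
        exact pvSsp_modifyHead_append pvS3 t buf c
      rw [hmh]
      exact ih (buf ++ [c]) out seen

theorem pvF_flatMap (g : List Char → List (List Char)) (LL : List (List Char)) :
    LL.flatMap (fun L => pvF (g L)) = pvF (LL.flatMap g) := by
  induction LL with
  | nil => simp [pvF]
  | cons L rest ih => simp [List.flatMap_cons, pvF_append, ih]

-- ===== VERDICT (by name: the statement is the Claim_ definition above) =====
theorem parse_items_from_text_spec : Claim_equal_parse_items_from_text := by
  intro text _
  unfold Spec_parse_items_from_text
  have hB : parse_items_from_text_alt text =
      (pvDD ([], PySem.Set.empty) ((pvF (pvSsp pvS3 text.toList)).map String.ofList)).1 := by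
    rw [parse_items_from_text_alt]
    rw [show ("\n".toList) = ['\n'] from by decide]
    have h := pvB_scan text.toList [] [] PySem.Set.empty
    rw [pvModifyHead_nil_append] at h
    exact congrArg Prod.fst h
  by_cases htext : text = ""
  · subst htext
    rw [hB]
    rw [parse_items_from_text, if_pos rfl]
    rw [show ("" : String).toList = [] from rfl]
    simp [pvSsp, pvF, pvDD, show PySem.Chars.strip ([] : List Char) = [] from rfl]
  · rw [parse_items_from_text]
    rw [if_neg htext]
    simp only []
    have htl : (PySem.Str.replace (PySem.Str.replace text "\r\n" "\n") "\r" "\n").toList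
        = (pvR2 text.toList).map pvF1 := by
      rw [PySem.Str.toList_replace, PySem.Str.toList_replace]
      rw [show ("\r\n".toList) = ['\r', '\n'] from by decide,
        show ("\r".toList) = ['\r'] from by decide,
        show ("\n".toList) = ['\n'] from by decide]
      rw [pvReplace_crlf, pvReplace_cr]
    have hsplit : PySem.Str.split?
        (PySem.Str.replace (PySem.Str.replace text "\r\n" "\n") "\r" "\n") "\n"
        = some (((pvSsp (· == '\n') ((pvR2 text.toList).map pvF1)).map String.ofList)) := by
      rw [PySem.Str.split?, htl]
      rw [show ("\n".toList) = ['\n'] from by decide]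
      rw [PySem.Chars.split?]
      simp [pvSplitOn_singleton]
    rw [hsplit]
    simp only [Option.getD_some]
    rw [pvA_outer _ (fun L hL c hc => by
      have := pvMem_ssp _ _ _ hL c hc
      simpa using this) []]
    rw [List.nil_append]
    have hfm : ((pvSsp (· == '\n') ((pvR2 text.toList).map pvF1)).flatMap
        (fun L => pvF (pvSsp (· == ',') L))) =
        pvF (pvSsp pvS2 ((pvR2 text.toList).map pvF1)) := by
      rw [pvF_flatMap]
      rw [pvSsp_flatMap]
      rfl
    rw [hfm]
    have hcore := pvCore text.toList []
    rw [pvModifyHead_nil_append, pvModifyHead_nil_append] at hcore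
    rw [hcore, hB]
    rfl
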